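-- pv_equiv track=rewrite | github.com/Minghui-Zhao/Flushing_Leetcode | Currency_Recognition.py | isValidThousSep
-- ===== SOURCE A (Python) =====
-- def isValidThousSep(str):
--     n = len(str)
--     if ',' not in set(str):
--         return True
--     for i in range(len(str)):
--         if str[i] == ',' and (i - n) % 4 != 0:
--             return False
--         if (i - n) % 4 == 0 and str[i] != ',':
--             return False
--     return True
-- ===== SOURCE B (Python) =====
-- def isValidThousSep(str):
--     if ',' not in str:
--         return True
--     parts = str.split(',')
--     return len(parts[0]) <= 3 and all(len(p) == 3 for p in parts[1:])
-- ===== Notes on version B (the rewrite author's own statement) =====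
-- stated objective: idiomatic
-- what changed: Replaces the per-index scan with its modulo-4 position test by splitting the string on the comma character and checking group lengths: first group at most 3, every later group exactly 3.
import Mathlib
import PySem

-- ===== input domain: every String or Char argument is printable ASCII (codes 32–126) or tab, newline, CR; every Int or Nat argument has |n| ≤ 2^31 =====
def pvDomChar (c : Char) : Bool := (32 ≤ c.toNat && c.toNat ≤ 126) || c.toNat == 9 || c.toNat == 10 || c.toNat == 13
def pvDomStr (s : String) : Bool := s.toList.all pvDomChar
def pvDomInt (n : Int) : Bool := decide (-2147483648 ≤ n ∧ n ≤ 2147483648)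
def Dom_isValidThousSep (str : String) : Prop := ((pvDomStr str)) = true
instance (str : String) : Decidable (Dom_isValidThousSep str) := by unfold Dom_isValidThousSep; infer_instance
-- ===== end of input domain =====

-- B validates thousand-separator placement by splitting on the comma and checking group
-- lengths (first group ≤ 3, later groups = 3) instead of A's per-index modulo-4 scan.

-- ===== PORT A =====
-- the 'for i in range(len(str))' loop with its two early 'return False' branches
def isValidThousSepLoop (cs : List Char) (n : Int) : List Int → Bool
  | [] => true
  | i :: rest =>
    if (PySem.List.pyGetD cs i ' ' == ',') && !(PySem.Int.mod (i - n) 4 == 0) then false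
    else if (PySem.Int.mod (i - n) 4 == 0) && !(PySem.List.pyGetD cs i ' ' == ',') then false
    else isValidThousSepLoop cs n rest

def isValidThousSep (str : String) : Bool :=
  let cs := str.toList
  let n : Int := cs.length
  if !((PySem.Set.ofList cs).contains ',') then true
  else isValidThousSepLoop cs n (PySem.List.pyRange 0 cs.length)

-- ===== PORT B =====
def isValidThousSep_alt (str : String) : Bool :=
  let cs := str.toList
  if !(PySem.Chars.isIn [','] cs) then true
  else
    let parts := PySem.Chars.splitOn cs [',']
    decide ((PySem.List.pyGetD parts 0 []).length ≤ 3)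
      && (PySem.List.slice parts (some 1) none).all (fun p => p.length == 3)

-- ===== PRECONDITION & SPEC =====
def Spec_isValidThousSep (str : String) (out : Bool) : Prop := out = isValidThousSep_alt str
instance (str : String) (out : Bool) : Decidable (Spec_isValidThousSep str out) := by unfold Spec_isValidThousSep; infer_instance

-- ===== CLAIM (what is proved, stated in full; the proofs are below) =====
def Claim_equal_isValidThousSep : Prop := ∀ (str : String), Dom_isValidThousSep str → Spec_isValidThousSep str (isValidThousSep str)

-- ===== LEMMAS AND PROOFS =====

-- structural form of A's positional condition: the character whose distance to the
-- right end of the string is a multiple of 4 must be a comma, and only those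
def specValid : List Char → Bool
  | [] => true
  | c :: cs => ((c == ',') == decide ((4:Int) ∣ ((cs.length : Int) + 1))) && specValid cs

-- simple structural recursion computing PySem.Chars.splitOn · [','] (proof-side only)
def splitC : List Char → List (List Char)
  | [] => [[]]
  | c :: cs =>
    if c = ',' then [] :: splitC cs
    else
      match splitC cs with
      | [] => [[c]]
      | h :: t => (c :: h) :: t

theorem splitC_ne_nil (cs : List Char) : splitC cs ≠ [] := by
  induction cs with
  | nil => simp [splitC]
  | cons c cs ih =>
    simp only [splitC]
    split_ifs
    · simp
    · cases h : splitC cs <;> simp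

theorem splitC_comma (cs : List Char) : splitC (',' :: cs) = [] :: splitC cs := by
  simp [splitC]

theorem splitC_cons {c : Char} (hc : c ≠ ',') {cs : List Char} {h : List Char}
    {t : List (List Char)} (hsp : splitC cs = h :: t) : splitC (c :: cs) = (c :: h) :: t := by
  simp [splitC, hc, hsp]

theorem go_spec (fuel : Nat) : ∀ (l cur : List Char) (acc : List (List Char)), l.length < fuel →
    PySem.Chars.splitOn.go [','] fuel l cur acc
      = acc.reverse ++ ((cur.reverse ++ (splitC l).headD []) :: (splitC l).tail) := by
  induction fuel with
  | zero => intro l cur acc h; omega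
  | succ f ih =>
    intro l cur acc h
    cases l with
    | nil => rw [PySem.Chars.splitOn.go.eq_def]; simp [splitC]
    | cons c rest =>
      by_cases hc : c = ','
      · subst hc
        rw [PySem.Chars.splitOn.go.eq_def]
        simp only [List.isPrefixOf, BEq.rfl, Bool.and_true, if_pos,
          List.length_cons, List.drop_succ_cons, List.length_nil, List.drop_zero]
        rw [ih rest [] _ (by simpa using h)]
        cases hsp : splitC rest with
        | nil => exact absurd hsp (splitC_ne_nil rest)
        | cons h1 t1 => simp [splitC, hsp]
      · rw [PySem.Chars.splitOn.go.eq_def]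
        have hpre : [','].isPrefixOf (c :: rest) = false := by
          simp [List.isPrefixOf]
          exact fun hh => absurd hh.symm hc
        simp only [hpre, Bool.false_eq_true, if_false]
        rw [ih rest (c :: cur) acc (by simpa using h)]
        cases hsp : splitC rest with
        | nil => exact absurd hsp (splitC_ne_nil rest)
        | cons h1 t1 => simp [splitC, hc, hsp]

theorem splitOn_eq_splitC (cs : List Char) : PySem.Chars.splitOn cs [','] = splitC cs := by
  rw [PySem.Chars.splitOn, go_spec (cs.length + 1) cs [] [] (by omega)]
  cases hsp : splitC cs with
  | nil => exact absurd hsp (splitC_ne_nil cs)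
  | cons h t => simp

theorem splitC_sum (cs : List Char) :
    ((splitC cs).map (fun p => p.length + 1)).sum = cs.length + 1 := by
  induction cs with
  | nil => simp [splitC]
  | cons c cs ih =>
    by_cases hc : c = ','
    · subst hc
      rw [splitC_comma]
      simp only [List.map_cons, List.sum_cons, List.length_cons, List.length_nil] at *
      omega
    · cases hsp : splitC cs with
      | nil => exact absurd hsp (splitC_ne_nil cs)
      | cons h t =>
        rw [splitC_cons hc hsp]
        rw [hsp] at ih
        simp only [List.map_cons, List.sum_cons, List.length_cons] at *
        omega

theorem all3_sum (t : List (List Char)) (h : t.all (fun p => p.length == 3) = true) :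
    (t.map (fun p => p.length + 1)).sum = 4 * t.length := by
  induction t with
  | nil => simp
  | cons p t ih =>
    simp only [List.all_cons, Bool.and_eq_true, beq_iff_eq] at h
    simp [h.1, ih h.2]; omega

theorem main_eq (cs : List Char) :
    (decide (((splitC cs).headD []).length ≤ 3) && ((splitC cs).tail).all (fun p => p.length == 3))
      = specValid cs
    ∧ ((splitC cs).all (fun p => p.length == 3)
      = (decide ((4:Int) ∣ ((cs.length : Int) + 1)) && specValid cs)) := by
  induction cs with
  | nil => exact ⟨by decide, by decide⟩
  | cons c cs ih =>
    obtain ⟨ihL, ih1⟩ := ih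
    by_cases hc : c = ','
    · subst hc
      refine ⟨?_, ?_⟩
      · rw [splitC_comma]
        simp only [List.headD_cons, List.tail_cons, specValid, BEq.rfl, List.length_nil]
        rw [ih1]
        simp
      · rw [splitC_comma]
        simp only [List.all_cons, specValid, BEq.rfl, List.length_nil, List.length_cons]
        rw [ih1]
        rw [Bool.eq_iff_iff]
        simp only [Bool.and_eq_true, decide_eq_true_eq, beq_iff_eq, Nat.cast_add, Nat.cast_one]
        constructor
        · rintro ⟨h03, _⟩
          omega
        · rintro ⟨ha, hb', _⟩
          have hb := of_decide_eq_true hb'.symm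
          exact absurd hb (by omega)
    · cases hsp : splitC cs with
      | nil => exact absurd hsp (splitC_ne_nil cs)
      | cons h t =>
        rw [hsp] at ihL ih1
        simp only [List.headD_cons, List.tail_cons] at ihL ih1
        have hcb : (c == ',') = false := by simp [hc]
        have hsum := splitC_sum cs
        rw [hsp] at hsum
        simp only [List.map_cons, List.sum_cons] at hsum
        by_cases ht : t.all (fun p => p.length == 3) = true
        · -- all tail groups have length 3, so cs.length + 1 = h.length + 1 + 4 * t.length
          have hs4 := all3_sum t ht
          have hn : (cs.length : Int) + 1 = (h.length : Int) + 1 + 4 * (t.length : Int) := by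
            omega
          rw [ht] at ihL
          simp only [Bool.and_true] at ihL
          refine ⟨?_, ?_⟩
          · rw [splitC_cons hc hsp]
            simp only [List.headD_cons, List.tail_cons, specValid, hcb, List.length_cons, ht,
              Bool.and_true, ← ihL, Bool.false_beq]
            rw [Bool.eq_iff_iff]
            simp only [decide_eq_true_eq, Bool.and_eq_true, Bool.not_eq_eq_eq_not, Bool.not_true,
              decide_eq_false_iff_not]
            omega
          · rw [splitC_cons hc hsp]
            simp only [List.all_cons, specValid, hcb, List.length_cons, ht, Bool.and_true,
              ← ihL, Bool.false_beq]
            rw [Bool.eq_iff_iff]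
            simp only [decide_eq_true_eq, Bool.and_eq_true, Bool.not_eq_eq_eq_not, Bool.not_true,
              decide_eq_false_iff_not, beq_iff_eq, Nat.cast_add, Nat.cast_one]
            omega
        · rw [Bool.not_eq_true] at ht
          have hsv : specValid cs = false := by
            rw [← ihL, ht]; simp
          refine ⟨?_, ?_⟩
          · rw [splitC_cons hc hsp]
            simp only [List.tail_cons, ht, specValid, hsv, Bool.and_false]
          · rw [splitC_cons hc hsp]
            simp only [List.all_cons, ht, specValid, hsv, Bool.and_false]

theorem loop_eq_all (cs : List Char) (n : Int) (l : List Int) :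
    isValidThousSepLoop cs n l
      = l.all (fun i => (PySem.List.pyGetD cs i ' ' == ',') == decide ((4:Int) ∣ (i - n))) := by
  induction l with
  | nil => rfl
  | cons i rest ih =>
    have hm : (PySem.Int.mod (i - n) 4 == 0) = decide ((4:Int) ∣ (i - n)) := by
      rw [Bool.eq_iff_iff]
      simp
    simp only [isValidThousSepLoop, hm, List.all_cons, ih]
    cases hg : (PySem.List.pyGetD cs i ' ' == ',') <;>
      cases hd : decide ((4:Int) ∣ (i - n)) <;> simp

theorem range_all_eq_specValid (cs : List Char) :
    (List.range cs.length).all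
        (fun i => (cs.getD i ' ' == ',') == decide ((4:Int) ∣ ((i : Int) - (cs.length : Int))))
      = specValid cs := by
  induction cs with
  | nil => rfl
  | cons c cs ih =>
    rw [List.length_cons, List.range_succ_eq_map]
    simp only [List.all_cons, List.all_map, Function.comp_def, Nat.succ_eq_add_one,
      List.getD_cons_zero, List.getD_cons_succ]
    push_cast
    have e1 : ∀ i : Nat, ((i : Int) + 1 - ((cs.length : Int) + 1)) = (i : Int) - (cs.length : Int) := by
      intro i; ring
    simp only [e1]
    rw [ih]
    show (((c == ',') == decide ((4:Int) ∣ (0 - ((cs.length : Int) + 1)))) && specValid cs)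
        = specValid (c :: cs)
    have e0 : decide ((4:Int) ∣ (0 - ((cs.length : Int) + 1)))
        = decide ((4:Int) ∣ ((cs.length : Int) + 1)) := by
      rw [Bool.eq_iff_iff]
      simp only [decide_eq_true_eq]
      constructor <;> intro h <;> omega
    rw [e0]
    rfl

-- the two ports test 'is there a comma?' the same way
theorem guard_eq (cs : List Char) :
    (PySem.Set.ofList cs).contains ',' = PySem.Chars.isIn [','] cs := by
  rw [Bool.eq_iff_iff]
  rw [PySem.Chars.isIn_iff_infix, List.singleton_infix_iff]
  rw [← PySem.Set.mem_ofList cs ',']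
  exact ⟨fun h => by simpa using h, fun h => by simpa using h⟩

-- A's loop body over range(len(str)) computes specValid
theorem portA_body_eq (cs : List Char) :
    isValidThousSepLoop cs cs.length (PySem.List.pyRange 0 cs.length) = specValid cs := by
  rw [loop_eq_all, PySem.List.pyRange_zero_natCast, List.all_map]
  simp only [Function.comp_def, PySem.List.pyGetD_natCast]
  exact range_all_eq_specValid cs

-- ===== VERDICT (by name: the statement is the Claim_ definition above) =====
theorem isValidThousSep_spec : Claim_equal_isValidThousSep := by
  intro str _
  simp only [Spec_isValidThousSep, isValidThousSep, isValidThousSep_alt]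
  rw [guard_eq]
  cases hg : PySem.Chars.isIn [','] str.toList
  · simp
  · simp only [Bool.not_true, Bool.false_eq_true, if_false]
    rw [portA_body_eq, splitOn_eq_splitC]
    cases hsp : splitC str.toList with
    | nil => exact absurd hsp (splitC_ne_nil str.toList)
    | cons h t =>
      have := (main_eq str.toList).1
      rw [hsp] at this
      simp only [List.headD_cons, List.tail_cons] at this
      rw [← this]
      congr 1
      · rw [PySem.List.pyGetD_zero]
        rfl
      · rw [PySem.List.slice_from _ (by omega : (0:Int) ≤ 1)]
        rfl
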